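-- pv_equiv track=rewrite | github.com/StardustGogeta/Math-Programming | Python/Unfinished/Euler/104/fib.py | trun_fib
-- ===== SOURCE A (Python) =====
-- def trun_fib(n):
--     n -= 1
--     f = 1
--     g = 1
--     for x in range(n//4):
--         #F = f + g
--         #G = F + g
--         f, g = (f+g)%10**9, (f+2*g)%10**9
--     if n % 2: return g
--     return f
-- ===== SOURCE B (Python) =====
-- M = 10 ** 9
--
-- def _matpow(k):
--     # k-th power of [[1, 1], [1, 2]] with entries reduced mod M, by binary exponentiation
--     if k == 0:
--         return (1, 0, 0, 1)
--     a, b, c, d = _matpow(k // 2)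
--     a2 = (a * a + b * c) % M
--     b2 = (a * b + b * d) % M
--     c2 = (c * a + d * c) % M
--     d2 = (c * b + d * d) % M
--     if k % 2:
--         return ((a2 + b2) % M, (a2 + 2 * b2) % M, (c2 + d2) % M, (c2 + 2 * d2) % M)
--     return (a2, b2, c2, d2)
--
-- def trun_fib(n):
--     k = (n - 1) // 4
--     if k < 0:
--         k = 0
--     a, b, c, d = _matpow(k)
--     f = (a + b) % M
--     g = (c + d) % M
--     return g if (n - 1) % 2 else f
-- ===== Notes on version B (the rewrite author's own statement) =====
-- stated objective: faster
-- what changed: Replaced the step-by-step linear recurrence loop (n//4 iterations) by binary matrix exponentiation of the recurrence's transition matrix modulo the last-nine-digits modulus.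
import Mathlib
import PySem

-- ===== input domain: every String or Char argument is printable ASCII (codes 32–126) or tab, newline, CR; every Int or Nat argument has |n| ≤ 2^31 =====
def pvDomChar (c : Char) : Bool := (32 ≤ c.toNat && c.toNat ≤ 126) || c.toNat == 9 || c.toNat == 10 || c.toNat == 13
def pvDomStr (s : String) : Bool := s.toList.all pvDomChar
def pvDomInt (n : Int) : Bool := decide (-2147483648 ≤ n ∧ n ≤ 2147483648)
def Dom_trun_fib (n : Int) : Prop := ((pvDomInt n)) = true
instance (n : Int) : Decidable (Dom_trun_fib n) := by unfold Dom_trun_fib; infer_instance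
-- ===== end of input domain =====

-- B replaces A's step-by-step recurrence loop by binary matrix exponentiation of the
-- transition matrix modulo the last-nine-digits modulus (objective: faster; measured).


-- ===== PORT A =====
def trun_fib (n : Int) : Int :=
  let n' := n - 1
  let fg : Int × Int :=
    (PySem.List.pyRange 0 (PySem.Int.floordiv n' 4) 1).foldl
      (fun s _ => (PySem.Int.mod (s.1 + s.2) (10 ^ 9), PySem.Int.mod (s.1 + 2 * s.2) (10 ^ 9)))
      (1, 1)
  if PySem.Int.mod n' 2 ≠ 0 then fg.2 else fg.1

-- ===== PORT B =====
-- binary exponentiation of [[1,1],[1,2]] with entries mod 10^9 (Source B's _matpow)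
def pvMatPow (k : Nat) : Int × Int × Int × Int :=
  if h : k = 0 then (1, 0, 0, 1)
  else
    let p := pvMatPow (k / 2)
    let a := p.1; let b := p.2.1; let c := p.2.2.1; let d := p.2.2.2
    let a2 := (a * a + b * c) % 10 ^ 9
    let b2 := (a * b + b * d) % 10 ^ 9
    let c2 := (c * a + d * c) % 10 ^ 9
    let d2 := (c * b + d * d) % 10 ^ 9
    if k % 2 ≠ 0 then
      ((a2 + b2) % 10 ^ 9, (a2 + 2 * b2) % 10 ^ 9, (c2 + d2) % 10 ^ 9, (c2 + 2 * d2) % 10 ^ 9)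
    else (a2, b2, c2, d2)
  termination_by k
  decreasing_by exact Nat.div_lt_self (Nat.pos_of_ne_zero h) (by norm_num)

def trun_fib_alt (n : Int) : Int :=
  let k0 := PySem.Int.floordiv (n - 1) 4
  let k := if k0 < 0 then 0 else k0
  let p := pvMatPow k.toNat   -- k ≥ 0: Nat recursion is Source B's recursion on the int k
  let f := (p.1 + p.2.1) % 10 ^ 9
  let g := (p.2.2.1 + p.2.2.2) % 10 ^ 9
  if PySem.Int.mod (n - 1) 2 ≠ 0 then g else f

-- ===== PRECONDITION & SPEC =====
def Spec_trun_fib (n : Int) (out : Int) : Prop := out = trun_fib_alt n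
instance (n : Int) (out : Int) : Decidable (Spec_trun_fib n out) := by unfold Spec_trun_fib; infer_instance

-- ===== CLAIM (what is proved, stated in full; the proofs are below) =====
def Claim_equal_trun_fib : Prop := ∀ (n : Int), Dom_trun_fib n → Spec_trun_fib n (trun_fib n)

-- ===== LEMMAS AND PROOFS =====

-- Pure (un-modded) 2×2 integer matrices as 4-tuples, plain multiplication and powers.
def pvMul (x y : Int × Int × Int × Int) : Int × Int × Int × Int :=
  (x.1 * y.1 + x.2.1 * y.2.2.1, x.1 * y.2.1 + x.2.1 * y.2.2.2,
   x.2.2.1 * y.1 + x.2.2.2 * y.2.2.1, x.2.2.1 * y.2.1 + x.2.2.2 * y.2.2.2)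

def pvM : Int × Int × Int × Int := (1, 1, 1, 2)

def pvPow : Nat → Int × Int × Int × Int
  | 0 => (1, 0, 0, 1)
  | k + 1 => pvMul pvM (pvPow k)

-- reduce all four entries mod 10^9
def pvRed (x : Int × Int × Int × Int) : Int × Int × Int × Int :=
  (x.1 % 10 ^ 9, x.2.1 % 10 ^ 9, x.2.2.1 % 10 ^ 9, x.2.2.2 % 10 ^ 9)

lemma pvMul_assoc (x y z : Int × Int × Int × Int) :
    pvMul (pvMul x y) z = pvMul x (pvMul y z) := by
  simp only [pvMul, Prod.mk.injEq]
  refine ⟨by ring, by ring, by ring, by ring⟩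

lemma pvPow_add (a b : Nat) : pvPow (a + b) = pvMul (pvPow a) (pvPow b) := by
  induction a with
  | zero => simp [pvPow, pvMul]
  | succ a ih =>
      have : a + 1 + b = (a + b) + 1 := by omega
      rw [this, pvPow, pvPow, ih, pvMul_assoc]

lemma pvMod_mulentry (a b c d : Int) :
    ((a % 10 ^ 9) * (b % 10 ^ 9) + (c % 10 ^ 9) * (d % 10 ^ 9)) % 10 ^ 9
      = (a * b + c * d) % 10 ^ 9 := by
  conv_lhs => rw [Int.add_emod, ← Int.mul_emod, ← Int.mul_emod, ← Int.add_emod]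

lemma pvRed_mul_red (x y : Int × Int × Int × Int) :
    pvRed (pvMul (pvRed x) (pvRed y)) = pvRed (pvMul x y) := by
  simp only [pvRed, pvMul, Prod.mk.injEq]
  exact ⟨pvMod_mulentry _ _ _ _, pvMod_mulentry _ _ _ _,
         pvMod_mulentry _ _ _ _, pvMod_mulentry _ _ _ _⟩

-- right-multiplying a reduced matrix by M, in the modded form pvMatPow uses
lemma pvRed_mulM (x : Int × Int × Int × Int) :
    ((x.1 % 10 ^ 9 + x.2.1 % 10 ^ 9) % 10 ^ 9,
     (x.1 % 10 ^ 9 + 2 * (x.2.1 % 10 ^ 9)) % 10 ^ 9,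
     (x.2.2.1 % 10 ^ 9 + x.2.2.2 % 10 ^ 9) % 10 ^ 9,
     (x.2.2.1 % 10 ^ 9 + 2 * (x.2.2.2 % 10 ^ 9)) % 10 ^ 9)
      = pvRed (pvMul x pvM) := by
  simp only [pvRed, pvMul, pvM, Prod.mk.injEq]
  refine ⟨by omega, by omega, by omega, by omega⟩

lemma pvPow_one : pvPow 1 = pvM := by
  simp [pvPow, pvMul, pvM]

lemma pvMatPow_eq (k : Nat) : pvMatPow k = pvRed (pvPow k) := by
  induction k using Nat.strong_induction_on with
  | _ k ih =>
    by_cases h : k = 0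
    · subst h; simp [pvMatPow, pvPow, pvRed]
    · have hlt : k / 2 < k := Nat.div_lt_self (Nat.pos_of_ne_zero h) (by norm_num)
      have ihh := ih (k / 2) hlt
      have e := pvRed_mul_red (pvPow (k / 2)) (pvPow (k / 2))
      simp only [pvRed, pvMul, Prod.mk.injEq] at e
      obtain ⟨e1, e2, e3, e4⟩ := e
      rw [pvMatPow]
      simp only [h, dite_false, ihh]
      by_cases hp : k % 2 = 0
      · have hk : k = k / 2 + k / 2 := by omega
        conv_rhs => rw [hk, pvPow_add]
        rw [← pvRed_mul_red]
        simp only [hp, pvRed, pvMul, if_neg (by decide : ¬ (0 : Nat) ≠ 0)]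
      · have h1 : k % 2 = 1 := by omega
        have hk : k = (k / 2 + k / 2) + 1 := by omega
        have hpk : pvPow (k / 2 + k / 2 + 1) = pvMul (pvMul (pvPow (k / 2)) (pvPow (k / 2))) pvM := by
          rw [pvPow_add, pvPow_add, pvPow_one]
        conv_rhs => rw [hk]
        rw [hpk, ← pvRed_mulM (pvMul (pvPow (k / 2)) (pvPow (k / 2)))]
        simp only [h1, pvRed, pvMul, if_pos (by decide : (1 : Nat) ≠ 0)]
        rw [e1, e2, e3, e4]

-- the vector (f, g) of the pure recurrence
def pvV : Nat → Int × Int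
  | 0 => (1, 1)
  | k + 1 => ((pvV k).1 + (pvV k).2, (pvV k).1 + 2 * (pvV k).2)

lemma pvPow_rowsum (k : Nat) :
    (pvPow k).1 + (pvPow k).2.1 = (pvV k).1 ∧
    (pvPow k).2.2.1 + (pvPow k).2.2.2 = (pvV k).2 := by
  induction k with
  | zero => simp [pvPow, pvV]
  | succ k ih =>
      simp only [pvPow, pvMul, pvM, pvV]
      constructor <;> [skip; skip] <;> (obtain ⟨h1, h2⟩ := ih; ring_nf; omega)

-- A's loop over any list computes iteration of the step, mod 10^9
lemma pvFold_eq_V (l : List Int) (s : Int × Int) (k : Nat) (hk : l.length = k)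
    (hs : s = ((pvV 0).1, (pvV 0).2)) :
    l.foldl (fun s _ => (PySem.Int.mod (s.1 + s.2) (10 ^ 9), PySem.Int.mod (s.1 + 2 * s.2) (10 ^ 9))) s
      = ((pvV k).1 % 10 ^ 9, (pvV k).2 % 10 ^ 9) := by
  -- generalize: start from the j-th modded state
  suffices H : ∀ (l : List Int) (j : Nat),
      l.foldl (fun s _ => (PySem.Int.mod (s.1 + s.2) (10 ^ 9), PySem.Int.mod (s.1 + 2 * s.2) (10 ^ 9)))
        ((pvV j).1 % 10 ^ 9, (pvV j).2 % 10 ^ 9)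
        = ((pvV (j + l.length)).1 % 10 ^ 9, (pvV (j + l.length)).2 % 10 ^ 9) by
    have h0 : s = ((pvV 0).1 % 10 ^ 9, (pvV 0).2 % 10 ^ 9) := by
      rw [hs]; simp [pvV]
    rw [h0, H l 0]; simp [hk]
  intro l
  induction l with
  | nil => intro j; simp
  | cons x xs ih =>
      intro j
      have hstep : ((PySem.Int.mod ((pvV j).1 % 10 ^ 9 + (pvV j).2 % 10 ^ 9) (10 ^ 9),
          PySem.Int.mod ((pvV j).1 % 10 ^ 9 + 2 * ((pvV j).2 % 10 ^ 9)) (10 ^ 9)) : Int × Int)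
          = ((pvV (j + 1)).1 % 10 ^ 9, (pvV (j + 1)).2 % 10 ^ 9) := by
        rw [PySem.Int.mod_eq_emod_of_pos (by norm_num), PySem.Int.mod_eq_emod_of_pos (by norm_num)]
        simp only [pvV, Prod.mk.injEq]
        constructor <;> omega
      have harg : j + (x :: xs).length = j + 1 + xs.length := by
        simp [List.length_cons]; omega
      simp only [List.foldl_cons, hstep, ih (j + 1), harg]

-- ===== VERDICT (by name: the statement is the Claim_ definition above) =====
theorem trun_fib_spec : Claim_equal_trun_fib := by
  intro n _
  unfold Spec_trun_fib trun_fib trun_fib_alt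
  simp only []
  set k0 : Int := PySem.Int.floordiv (n - 1) 4 with hk0
  have hknat : (if k0 < 0 then (0 : Int) else k0).toNat = k0.toNat := by
    by_cases h : k0 < 0 <;> simp [h] <;> omega
  have hlen : (PySem.List.pyRange 0 k0 1).length = k0.toNat := by
    rw [PySem.List.length_pyRange_one]; congr 1; omega
  rw [pvFold_eq_V _ ((1 : Int), (1 : Int)) k0.toNat hlen (by simp [pvV]), hknat, pvMatPow_eq]
  obtain ⟨h1, h2⟩ := pvPow_rowsum k0.toNat
  by_cases hp : PySem.Int.mod (n - 1) 2 ≠ 0 <;>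
    simp only [hp, if_neg, not_false_iff, pvRed] <;>
    [rw [← h2]; rw [← h1]] <;> omega
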